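-- pv_equiv track=rewrite | github.com/RaviPatel04/GTU | IS/pr3.py | create_digraphs
-- ===== SOURCE A (Python) =====
-- def create_digraphs(text):
--     """Create digraphs from the processed text."""
--     digraphs = []
--     i = 0
--     while i < len(text):
--         if i + 1 < len(text) and text[i] != text[i + 1]:
--             digraphs.append([text[i], text[i + 1]])
--             i += 2
--         else:
--             digraphs.append([text[i], 'X'])
--             i += 1
--     return digraphs
-- ===== SOURCE B (Python) =====
-- def create_digraphs(text):
--     """Create digraphs from the processed text."""
--     digraphs = []
--     pending = None
--     for ch in text:
--         if pending is None:
--             pending = ch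
--         elif pending == ch:
--             digraphs.append([pending, 'X'])
--             pending = ch
--         else:
--             digraphs.append([pending, ch])
--             pending = None
--     if pending is not None:
--         digraphs.append([pending, 'X'])
--     return digraphs
-- ===== Notes on version B (the rewrite author's own statement) =====
-- stated objective: alternative
-- what changed: Replaced the index-based while loop with variable step (i += 1 or 2) by a single streaming for-loop keeping one pending-character buffer that is flushed after the loop.
import Mathlib
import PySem

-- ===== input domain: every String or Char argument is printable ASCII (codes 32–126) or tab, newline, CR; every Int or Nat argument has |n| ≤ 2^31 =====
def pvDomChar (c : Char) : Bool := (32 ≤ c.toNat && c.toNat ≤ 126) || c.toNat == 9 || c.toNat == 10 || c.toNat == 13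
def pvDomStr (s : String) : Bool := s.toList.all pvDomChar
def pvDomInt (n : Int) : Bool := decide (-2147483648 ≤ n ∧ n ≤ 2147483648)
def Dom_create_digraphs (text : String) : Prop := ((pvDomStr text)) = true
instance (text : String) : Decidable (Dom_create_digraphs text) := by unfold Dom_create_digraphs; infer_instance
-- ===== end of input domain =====

-- ===== PORT A =====
-- Port of A's while loop over index i: recursion over the remaining characters,
-- consuming two when they differ, one otherwise.
def pvGoA : List Char → List (List String)
  | [] => []
  | [c] => [[String.ofList [c], "X"]]
  | c :: d :: rest =>
      if c ≠ d then [String.ofList [c], String.ofList [d]] :: pvGoA rest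
      else [String.ofList [c], "X"] :: pvGoA (d :: rest)

def create_digraphs (text : String) : List (List String) := pvGoA text.toList

-- ===== PORT B =====
-- B: streaming fold with a one-character pending buffer, flushed after the loop.
def pvStepB (st : List (List String) × Option Char) (ch : Char) : List (List String) × Option Char :=
  match st with
  | (acc, none) => (acc, some ch)
  | (acc, some b) =>
      if b == ch then (acc ++ [[String.ofList [b], "X"]], some ch)
      else (acc ++ [[String.ofList [b], String.ofList [ch]]], none)

def pvFlushB (st : List (List String) × Option Char) : List (List String) :=
  match st with
  | (acc, none) => acc
  | (acc, some b) => acc ++ [[String.ofList [b], "X"]]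

def create_digraphs_alt (text : String) : List (List String) :=
  pvFlushB (text.toList.foldl pvStepB ([], none))

-- ===== PRECONDITION & SPEC =====
def Spec_create_digraphs (text : String) (out : List (List String)) : Prop := out = create_digraphs_alt text
instance (text : String) (out : List (List String)) : Decidable (Spec_create_digraphs text out) := by unfold Spec_create_digraphs; infer_instance

-- ===== CLAIM (what is proved, stated in full; the proofs are below) =====
def Claim_equal_create_digraphs : Prop := ∀ (text : String), Dom_create_digraphs text → Spec_create_digraphs text (create_digraphs text)

-- ===== LEMMAS AND PROOFS =====

-- ===== VERDICT at bottom =====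


theorem pv_fold_goA : ∀ (cs : List Char) (acc : List (List String)) (buf : Option Char),
    pvFlushB (cs.foldl pvStepB (acc, buf)) =
      acc ++ pvGoA (match buf with | none => cs | some b => b :: cs) := by
  intro cs
  induction cs with
  | nil =>
      intro acc buf
      cases buf <;> simp [pvFlushB, pvGoA]
  | cons ch rest ih =>
      intro acc buf
      cases buf with
      | none =>
          simpa [pvStepB] using ih acc (some ch)
      | some b =>
          by_cases h : b = ch
          · subst h
            simp [pvStepB, pvGoA, ih]
          · simp [pvStepB, h, pvGoA, ih]

theorem create_digraphs_spec : Claim_equal_create_digraphs := by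
  intro text _
  unfold Spec_create_digraphs create_digraphs create_digraphs_alt
  simpa using (pv_fold_goA text.toList [] none).symm
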